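-- pv_equiv track=rewrite | github.com/sigjhl/p5 | src/modules/quality_assurance.py | _strip_order_keys
-- ===== SOURCE A (Python) =====
-- def _strip_order_keys(script: str) -> str:
--     """Remove order keys from script to return clean output."""
--     lines = script.strip().split('\n')
--     clean_lines = []
--
--     for line in lines:
--         if line.strip() and line.startswith('[') and '] ' in line:
--             key_end = line.find('] ')
--             if key_end > 0:
--                 clean_lines.append(line[key_end + 2:])
--             else:
--                 clean_lines.append(line)
--         else:
--             clean_lines.append(line)
--
--     return '\n'.join(clean_lines)
-- ===== SOURCE B (Python) =====
-- def _strip_order_keys(script: str) -> str: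
--     """Remove order keys from script to return clean output."""
--     s = script.strip()
--     n = len(s)
--     out = []
--     i = 0
--     while i < n:
--         # i is at the start of a line
--         if s[i] == '[':
--             j = i
--             while j < n and s[j] != '\n':
--                 if s[j] == ']' and j + 1 < n and s[j + 1] == ' ':
--                     i = j + 2  # drop the "[...] " prefix
--                     break
--                 j += 1
--         while i < n and s[i] != '\n':
--             out.append(s[i])
--             i += 1
--         if i < n:
--             out.append('\n')
--             i += 1
--     return ''.join(out)
-- ===== Notes on version B (the rewrite author's own statement) =====
-- stated objective: alternative
-- what changed: Replaces A's split-into-lines / per-line startswith-find-slice rebuild / join pipeline with a single streaming character scan over the stripped script: an index state machine that at each line start looks ahead for the closing key delimiter before the newline and copies characters, never splitting or joining lines.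
import Mathlib
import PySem

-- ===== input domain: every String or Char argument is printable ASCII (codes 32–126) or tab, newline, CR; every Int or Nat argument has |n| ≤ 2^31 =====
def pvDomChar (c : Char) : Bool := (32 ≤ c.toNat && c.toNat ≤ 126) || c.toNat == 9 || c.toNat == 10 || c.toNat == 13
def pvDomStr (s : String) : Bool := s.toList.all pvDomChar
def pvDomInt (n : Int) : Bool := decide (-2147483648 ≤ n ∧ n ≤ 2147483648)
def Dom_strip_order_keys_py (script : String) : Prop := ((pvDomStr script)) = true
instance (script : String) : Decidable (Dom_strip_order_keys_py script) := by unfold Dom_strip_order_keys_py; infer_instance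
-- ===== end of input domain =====

-- B replaces A's split-into-lines / per-line rebuild / join pipeline with a single
-- streaming character scan over the stripped script (an index state machine; no split/join).

-- ===== PORT A =====
def strip_order_keys_py (script : String) : String :=
  let lines := (PySem.Str.split? (PySem.Str.strip script) "\n").getD []
  let clean_lines := lines.foldl (fun acc line =>
    if PySem.Str.len (PySem.Str.strip line) ≠ 0 &&
       PySem.Str.startswith line "[" && PySem.Str.isIn "] " line then
      let key_end := PySem.Str.find line "] "
      if key_end > 0 then acc ++ [PySem.Str.slice line (some (key_end + 2)) none]
      else acc ++ [line]
    else acc ++ [line]) ([] : List String)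
  PySem.Str.join "\n" clean_lines

-- ===== PORT B =====
-- inner j-loop of Source B: scan for "] " before the newline; some = remainder after it (i = j + 2)
def pvScan : List Char → Option (List Char)
  | [] => none
  | c :: rest =>
    if c = '\n' then none
    else if c = ']' ∧ rest.head? = some ' ' then some rest.tail
    else pvScan rest

-- Source B's "if s[i] == '[': …" step: the new remainder after the optional key skip
def pvCleanRem (l : List Char) : List Char :=
  match l with
  | [] => []
  | c :: _ => if c = '[' then (pvScan l).getD l else l

-- the copy-until-newline loop of Source B: (characters copied, rest of the string)
def pvCopyLine : List Char → List Char × List Char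
  | [] => ([], [])
  | c :: rest => if c = '\n' then ([], c :: rest)
                 else ((pvCopyLine rest).1.cons c, (pvCopyLine rest).2)

-- termination facts for pvEmit (cited in decreasing_by)
theorem pvScan_length_lt : ∀ (l m : List Char), pvScan l = some m → m.length < l.length := by
  intro l
  induction l with
  | nil => intro m h; simp [pvScan] at h
  | cons c rest ih =>
    intro m h
    simp only [pvScan] at h
    split_ifs at h with h1 h2
    · obtain ⟨h3, h4⟩ := h2
      cases rest with
      | nil => simp at h4
      | cons d t =>
        simp only [Option.some.injEq] at h
        subst h
        simp
    · have := ih m h; simp; omega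

theorem pvCopyLine_snd_length_le : ∀ (l : List Char), (pvCopyLine l).2.length ≤ l.length := by
  intro l
  induction l with
  | nil => simp [pvCopyLine]
  | cons c rest ih =>
    simp only [pvCopyLine]
    split_ifs with h
    · simp
    · simp; omega

theorem pvCleanRem_length_le (l : List Char) : (pvCleanRem l).length ≤ l.length := by
  match l with
  | [] => simp [pvCleanRem]
  | c :: rest =>
    simp only [pvCleanRem]
    split_ifs with h
    · cases hs : pvScan (c :: rest) with
      | none => simp
      | some m => simpa using le_of_lt (pvScan_length_lt _ _ hs)
    · simp

-- outer while loop of Source B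
def pvEmit : List Char → List Char
  | [] => []
  | c :: rest =>
    match h : (pvCopyLine (pvCleanRem (c :: rest))).2 with
    | [] => (pvCopyLine (pvCleanRem (c :: rest))).1
    | _ :: t => (pvCopyLine (pvCleanRem (c :: rest))).1 ++ '\n' :: pvEmit t
  termination_by l => l.length
  decreasing_by
    have h1 := pvCopyLine_snd_length_le (pvCleanRem (c :: rest))
    have h2 := pvCleanRem_length_le (c :: rest)
    rw [h] at h1
    simp at h1 h2 ⊢
    omega

def strip_order_keys_py_alt (script : String) : String :=
  String.ofList (pvEmit (PySem.Chars.strip script.toList))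

-- ===== PRECONDITION & SPEC =====
def Spec_strip_order_keys_py (script : String) (out : String) : Prop := out = strip_order_keys_py_alt script
instance (script : String) (out : String) : Decidable (Spec_strip_order_keys_py script out) := by unfold Spec_strip_order_keys_py; infer_instance

-- ===== CLAIM (what is proved, stated in full; the proofs are below) =====
def Claim_equal_strip_order_keys_py : Prop := ∀ (script : String), Dom_strip_order_keys_py script → Spec_strip_order_keys_py script (strip_order_keys_py script)

-- ===== LEMMAS AND PROOFS =====

-- A's per-line value, extracted from its loop body (proof helper only)
def pvFA (line : String) : String :=
  if PySem.Str.len (PySem.Str.strip line) ≠ 0 &&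
     PySem.Str.startswith line "[" && PySem.Str.isIn "] " line then
    if PySem.Str.find line "] " > 0 then
      PySem.Str.slice line (some (PySem.Str.find line "] " + 2)) none
    else line
  else line

-- first occurrence of "] " in l: (prefix before it, suffix after it), if any
def pvFS : List Char → Option (List Char × List Char)
  | [] => none
  | c :: rest =>
    if [']', ' '].isPrefixOf (c :: rest) then some ([], (c :: rest).drop 2)
    else (pvFS rest).map (fun pq => (c :: pq.1, pq.2))

theorem pvFS_decomp : ∀ (l p q : List Char), pvFS l = some (p, q) → l = p ++ [']', ' '] ++ q := by
  intro l
  induction l with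
  | nil => intro p q h; simp [pvFS] at h
  | cons c rest ih =>
    intro p q h
    simp only [pvFS] at h
    split at h
    · rename_i hp
      obtain ⟨h1, h2⟩ := Prod.mk.injEq .. ▸ Option.some.injEq .. ▸ h
      subst h1
      rw [List.isPrefixOf_iff_prefix] at hp
      obtain ⟨t, ht⟩ := hp
      simp only [← ht] at h2 ⊢
      simp [← h2]
    · cases hfs : pvFS rest with
      | none => simp [hfs] at h
      | some pq =>
        simp only [hfs, Option.map_some] at h
        obtain ⟨h1, h2⟩ := Prod.mk.injEq .. ▸ Option.some.injEq .. ▸ h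
        have := ih pq.1 pq.2 (by rw [hfs])
        subst h1 h2
        simp [this]

theorem pvFind_go : ∀ (l : List Char) (k : Nat),
    PySem.Chars.find.go [']', ' '] l k =
      match pvFS l with
      | none => -1
      | some (p, _) => (k : Int) + p.length := by
  intro l
  induction l with
  | nil => intro k; simp [PySem.Chars.find.go, pvFS, List.isEmpty]
  | cons c rest ih =>
    intro k
    rw [PySem.Chars.find.go]
    by_cases hp : [']', ' '].isPrefixOf (c :: rest) = true
    · simp [hp, pvFS]
    · simp only [hp, if_false, Bool.false_eq_true, ih (k + 1), pvFS]
      cases hfs : pvFS rest with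
      | none => simp
      | some pq => simp; ring

-- pvScan finds the first "] ": on a newline-free list it is exactly pvFS's suffix
theorem pvScan_eq_pvFS : ∀ (l : List Char), '\n' ∉ l → pvScan l = (pvFS l).map Prod.snd := by
  intro l
  induction l with
  | nil => intro _; simp [pvScan, pvFS]
  | cons c rest ih =>
    intro hn
    have hc : c ≠ '\n' := by intro h; exact hn (by simp [h])
    have hrest : '\n' ∉ rest := fun h => hn (by simp [h])
    simp only [pvScan, pvFS, if_neg hc]
    by_cases hp : [']', ' '].isPrefixOf (c :: rest) = true
    · have hcond : c = ']' ∧ rest.head? = some ' ' := by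
        rw [List.isPrefixOf_iff_prefix] at hp
        obtain ⟨t, ht⟩ := hp
        cases rest with
        | nil => simp at ht
        | cons d u =>
          simp at ht
          exact ⟨ht.1.symm, by simp; exact ht.2.1.symm⟩
      rw [if_pos hcond, if_pos hp]
      cases rest with
      | nil => simp at hcond
      | cons d u => simp
    · have hcond : ¬ (c = ']' ∧ rest.head? = some ' ') := by
        intro ⟨h1, h2⟩
        apply hp
        cases rest with
        | nil => simp at h2
        | cons d u =>
          simp at h2
          rw [List.isPrefixOf_iff_prefix]
          subst h1 h2
          exact ⟨u, by simp⟩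
      rw [if_neg hcond, if_neg hp, ih hrest]
      cases pvFS rest <;> simp

-- a successful pvScan on a newline-free list yields a newline-free remainder
theorem pvScan_no_nl : ∀ (l m : List Char), '\n' ∉ l → pvScan l = some m → '\n' ∉ m := by
  intro l
  induction l with
  | nil => intro m _ h; simp [pvScan] at h
  | cons c rest ih =>
    intro m hn h
    have hrest : '\n' ∉ rest := fun hh => hn (by simp [hh])
    simp only [pvScan] at h
    split_ifs at h with h1 h2
    · simp at h
      subst h
      intro hm
      exact hrest (List.mem_of_mem_tail hm)
    · exact ih m hrest h

-- pvScan across a line boundary: "] " never straddles the '\n'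
theorem pvScan_append : ∀ (a b : List Char), '\n' ∉ a →
    pvScan (a ++ '\n' :: b) = (pvScan a).map (· ++ '\n' :: b) := by
  intro a
  induction a with
  | nil => intro b _; simp [pvScan]
  | cons c rest ih =>
    intro b hn
    have hc : c ≠ '\n' := fun h => hn (by simp [h])
    have hrest : '\n' ∉ rest := fun h => hn (by simp [h])
    simp only [List.cons_append, pvScan, if_neg hc]
    by_cases h2 : c = ']' ∧ rest.head? = some ' '
    · have h2' : c = ']' ∧ (rest ++ '\n' :: b).head? = some ' ' := by
        refine ⟨h2.1, ?_⟩
        cases rest with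
        | nil => simp at h2
        | cons d u => simpa using h2.2
      rw [if_pos h2', if_pos h2]
      cases rest with
      | nil => simp at h2
      | cons d u => simp
    · have h2' : ¬ (c = ']' ∧ (rest ++ '\n' :: b).head? = some ' ') := by
        intro ⟨ha, hb⟩
        apply h2
        refine ⟨ha, ?_⟩
        cases rest with
        | nil => simp at hb
        | cons d u => simpa using hb
      rw [if_neg h2', if_neg h2, ih b hrest]

theorem pvCopyLine_no_nl : ∀ (l : List Char), '\n' ∉ l → pvCopyLine l = (l, []) := by
  intro l
  induction l with
  | nil => intro _; simp [pvCopyLine]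
  | cons c rest ih =>
    intro hn
    have hc : c ≠ '\n' := fun h => hn (by simp [h])
    simp [pvCopyLine, hc, ih (fun h => hn (by simp [h]))]

theorem pvCopyLine_append : ∀ (a b : List Char), '\n' ∉ a →
    pvCopyLine (a ++ '\n' :: b) = (a, '\n' :: b) := by
  intro a
  induction a with
  | nil => intro b _; simp [pvCopyLine]
  | cons c rest ih =>
    intro b hn
    have hc : c ≠ '\n' := fun h => hn (by simp [h])
    simp [pvCopyLine, hc, ih b (fun h => hn (by simp [h]))]

theorem pvCleanRem_append (a b : List Char) (hn : '\n' ∉ a) :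
    pvCleanRem (a ++ '\n' :: b) = pvCleanRem a ++ '\n' :: b := by
  cases a with
  | nil =>
    simp only [List.nil_append, pvCleanRem]
    rw [if_neg (by decide : ¬ ('\n' : Char) = '[')]
  | cons c rest =>
    simp only [List.cons_append, pvCleanRem]
    by_cases hc : c = '['
    · rw [if_pos hc, if_pos hc,
        show (c :: (rest ++ '\n' :: b) : List Char) = (c :: rest) ++ '\n' :: b from rfl,
        pvScan_append _ _ hn]
      cases pvScan (c :: rest) <;> simp
    · rw [if_neg hc, if_neg hc]
      rfl

-- the result of pvCleanRem of a newline-free list is newline-free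
theorem pvCleanRem_no_nl (l : List Char) (hn : '\n' ∉ l) : '\n' ∉ pvCleanRem l := by
  cases l with
  | nil => simp [pvCleanRem]
  | cons c rest =>
    simp only [pvCleanRem]
    split_ifs with hc
    · cases hs : pvScan (c :: rest) with
      | none => simpa using hn
      | some m => simpa using pvScan_no_nl _ _ hn hs
    · exact hn

-- my split-on-'\n' recursion (proof helper)
def pvHead (p : List Char) : List (List Char) → List (List Char)
  | [] => [p]
  | h :: t => (p ++ h) :: t

def pvSplitNl : List Char → List (List Char)
  | [] => [[]]
  | c :: rest => if c = '\n' then [] :: pvSplitNl rest else pvHead [c] (pvSplitNl rest)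

theorem pvSplitNl_ne_nil : ∀ (l : List Char), pvSplitNl l ≠ [] := by
  intro l
  cases l with
  | nil => simp [pvSplitNl]
  | cons c rest =>
    simp only [pvSplitNl]
    split_ifs
    · simp
    · cases h : pvSplitNl rest <;> simp [pvHead]

theorem pvHead_nil : ∀ (xs : List (List Char)), xs ≠ [] → pvHead [] xs = xs := by
  intro xs h
  cases xs with
  | nil => exact absurd rfl h
  | cons a t => simp [pvHead]

theorem pvHead_pvHead (p q : List Char) (xs : List (List Char)) :
    pvHead p (pvHead q xs) = pvHead (p ++ q) xs := by
  cases xs <;> simp [pvHead]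

-- PySem's splitOn with separator "\n" is pvSplitNl
theorem pvSplitOn_go : ∀ (fuel : Nat) (l cur : List Char) (acc : List (List Char)),
    l.length ≤ fuel →
    PySem.Chars.splitOn.go ['\n'] fuel l cur acc =
      acc.reverse ++ pvHead cur.reverse (pvSplitNl l) := by
  intro fuel
  induction fuel with
  | zero =>
    intro l cur acc h
    have : l = [] := List.length_eq_zero_iff.mp (by omega)
    subst this
    rw [PySem.Chars.splitOn.go]
    simp [pvSplitNl, pvHead]
  | succ f ih =>
    intro l cur acc h
    cases l with
    | nil =>
      rw [PySem.Chars.splitOn.go]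
      simp [pvSplitNl, pvHead]
      omega
    | cons c rest =>
      rw [PySem.Chars.splitOn.go]
      by_cases hc : c = '\n'
      · have hp : ['\n'].isPrefixOf (c :: rest) = true := by
          subst hc; simp [List.isPrefixOf]
        rw [if_pos hp,
          show List.drop (['\n'] : List Char).length (c :: rest) = rest from rfl,
          ih rest [] (cur.reverse :: acc) (by simp at h ⊢; omega)]
        simp only [pvSplitNl, if_pos hc, List.reverse_nil]
        rw [pvHead_nil _ (pvSplitNl_ne_nil rest)]
        cases hsp : pvSplitNl rest with
        | nil => exact absurd hsp (pvSplitNl_ne_nil rest)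
        | cons a t => simp [pvHead]
      · have hp : ¬ ['\n'].isPrefixOf (c :: rest) = true := by
          simp [List.isPrefixOf]
          intro hcon; exact absurd hcon.symm hc
        rw [if_neg hp, ih rest (c :: cur) acc (by simp at h ⊢; omega)]
        simp only [pvSplitNl, if_neg hc, pvHead_pvHead, List.reverse_cons]

theorem pvSplitOn_eq (l : List Char) :
    PySem.Chars.splitOn l ['\n'] = pvSplitNl l := by
  unfold PySem.Chars.splitOn
  rw [pvSplitOn_go (l.length + 1) l [] [] (by omega)]
  simp [pvHead_nil _ (pvSplitNl_ne_nil l)]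

theorem pvSplitNl_no_nl (l : List Char) (hn : '\n' ∉ l) : pvSplitNl l = [l] := by
  induction l with
  | nil => simp [pvSplitNl]
  | cons c rest ih =>
    have hc : c ≠ '\n' := fun h => hn (by simp [h])
    simp only [pvSplitNl, if_neg hc]
    rw [ih (fun h => hn (by simp [h]))]
    simp [pvHead]

theorem pvSplitNl_append (a b : List Char) (hn : '\n' ∉ a) :
    pvSplitNl (a ++ '\n' :: b) = a :: pvSplitNl b := by
  induction a with
  | nil => simp [pvSplitNl]
  | cons c rest ih =>
    have hc : c ≠ '\n' := fun h => hn (by simp [h])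
    simp only [List.cons_append, pvSplitNl, if_neg hc]
    rw [ih (fun h => hn (by simp [h]))]
    simp [pvHead]

theorem pvSplitNl_mem_no_nl : ∀ (l : List Char), ∀ a ∈ pvSplitNl l, '\n' ∉ a := by
  intro l
  induction l with
  | nil => intro a ha; simp [pvSplitNl] at ha; simp [ha]
  | cons c rest ih =>
    intro a ha
    simp only [pvSplitNl] at ha
    split_ifs at ha with hc
    · rcases List.mem_cons.mp ha with h | h
      · simp [h]
      · exact ih a h
    · cases hsp : pvSplitNl rest with
      | nil => exact absurd hsp (pvSplitNl_ne_nil rest)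
      | cons x t =>
        rw [hsp] at ha
        simp only [pvHead] at ha
        rcases List.mem_cons.mp ha with h | h
        · subst h
          intro hm
          rcases List.mem_cons.mp hm with h' | h'
          · exact hc h'.symm
          · exact ih x (by simp [hsp]) h'
        · exact ih a (by simp [hsp, h])

-- pvEmit on a newline-free list is the per-line cleaner
theorem pvEmit_no_nl (l : List Char) (hn : '\n' ∉ l) : pvEmit l = pvCleanRem l := by
  cases l with
  | nil => simp [pvEmit, pvCleanRem]
  | cons c rest =>
    have h1 : '\n' ∉ pvCleanRem (c :: rest) := pvCleanRem_no_nl _ hn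
    have h2 : pvCopyLine (pvCleanRem (c :: rest)) = (pvCleanRem (c :: rest), []) :=
      pvCopyLine_no_nl _ h1
    rw [pvEmit]
    split
    · rename_i heq; rw [h2]
    · rename_i x t heq
      rw [h2] at heq
      simp at heq

theorem pvEmit_append (a b : List Char) (hn : '\n' ∉ a) :
    pvEmit (a ++ '\n' :: b) = pvCleanRem a ++ '\n' :: pvEmit b := by
  cases a with
  | nil =>
    simp only [List.nil_append]
    rw [pvEmit]
    have hcr : pvCleanRem ('\n' :: b) = '\n' :: b := by
      simp only [pvCleanRem]
      rw [if_neg (by decide : ¬ ('\n' : Char) = '[')]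
    have h2 : pvCopyLine ('\n' :: b) = ([], '\n' :: b) := by
      simp [pvCopyLine]
    split
    · rename_i heq
      rw [hcr, h2] at heq
      simp at heq
    · rename_i x t heq
      rw [hcr, h2] at heq
      simp at heq
      obtain ⟨_, h4⟩ := heq
      subst h4
      rw [hcr, h2]
      simp [pvCleanRem]
  | cons c rest =>
    have hcr := pvCleanRem_append (c :: rest) b hn
    have hcn : '\n' ∉ pvCleanRem (c :: rest) := pvCleanRem_no_nl _ hn
    have h2 : pvCopyLine (pvCleanRem (c :: rest) ++ '\n' :: b)
        = (pvCleanRem (c :: rest), '\n' :: b) := pvCopyLine_append _ _ hcn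
    rw [List.cons_append, pvEmit]
    split
    · rename_i heq
      rw [show ((c :: rest) ++ '\n' :: b : List Char) = c :: (rest ++ '\n' :: b) from rfl] at hcr
      rw [hcr, h2] at heq
      simp at heq
    · rename_i x t heq
      rw [show ((c :: rest) ++ '\n' :: b : List Char) = c :: (rest ++ '\n' :: b) from rfl] at hcr
      rw [hcr, h2] at heq
      simp at heq
      obtain ⟨_, h4⟩ := heq
      subst h4
      rw [hcr, h2]

-- the main streaming lemma: pvEmit = join ∘ map pvCleanRem ∘ split
theorem pvNlDecomp : ∀ (l : List Char), '\n' ∈ l → ∃ a b, l = a ++ '\n' :: b ∧ '\n' ∉ a := by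
  intro l
  induction l with
  | nil => intro h; simp at h
  | cons c rest ih =>
    intro h
    by_cases hc : c = '\n'
    · exact ⟨[], rest, by simp [hc], by simp⟩
    · have hr : '\n' ∈ rest := by
        rcases List.mem_cons.mp h with h1 | h1
        · exact absurd h1.symm hc
        · exact h1
      obtain ⟨a, b, h1, h2⟩ := ih hr
      refine ⟨c :: a, b, by simp [h1], ?_⟩
      intro hm
      rcases List.mem_cons.mp hm with h3 | h3
      · exact hc h3.symm
      · exact h2 h3

theorem pvEmit_eq_join : ∀ (n : Nat) (l : List Char), l.length ≤ n →
    pvEmit l = PySem.Chars.join ['\n'] ((pvSplitNl l).map pvCleanRem) := by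
  intro n
  induction n with
  | zero =>
    intro l h
    have : l = [] := List.length_eq_zero_iff.mp (by omega)
    subst this
    simp [pvEmit, pvSplitNl, pvCleanRem, PySem.Chars.join, List.intercalate]
  | succ k ih =>
    intro l h
    by_cases hnl : '\n' ∈ l
    · obtain ⟨a, b, hab, hna⟩ := pvNlDecomp l hnl
      subst hab
      have hb : b.length ≤ k := by simp at h; omega
      rw [pvEmit_append a b hna, pvSplitNl_append a b hna, ih b hb]
      cases hsp : pvSplitNl b with
      | nil => exact absurd hsp (pvSplitNl_ne_nil b)
      | cons x t =>
        simp only [List.map_cons, PySem.Chars.join_cons_cons]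
        simp
    · rw [pvEmit_no_nl l hnl, pvSplitNl_no_nl l hnl]
      simp [PySem.Chars.join, List.intercalate]

-- A's loop body always appends exactly pvFA line
theorem pvBody_eq : (fun (acc : List String) (line : String) =>
    if PySem.Str.len (PySem.Str.strip line) ≠ 0 &&
       PySem.Str.startswith line "[" && PySem.Str.isIn "] " line then
      let key_end := PySem.Str.find line "] "
      if key_end > 0 then acc ++ [PySem.Str.slice line (some (key_end + 2)) none]
      else acc ++ [line]
    else acc ++ [line]) = (fun acc line => acc ++ [pvFA line]) := by
  funext acc line
  unfold pvFA
  simp only []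
  split_ifs <;> rfl

-- per-line agreement: A's loop-body value and B's streaming key skip coincide on a newline-free line
theorem pvLine_eq (line : String) (hn : '\n' ∉ line.toList) :
    (pvFA line).toList = pvCleanRem line.toList := by
  unfold pvFA
  by_cases hs : PySem.Str.startswith line "[" = true
  · have hl : ∃ rest, line.toList = '[' :: rest := by
      unfold PySem.Str.startswith PySem.Chars.startswith at hs
      cases h : line.toList with
      | nil => rw [h] at hs; simp [show ("[".toList) = ['['] from rfl] at hs
      | cons c t =>
        rw [h, show ("[".toList) = ['['] from rfl] at hs
        simp [List.isPrefixOf] at hs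
        exact ⟨t, by rw [hs]⟩
    obtain ⟨rest, hrest⟩ := hl
    have hstrip : PySem.Str.len (PySem.Str.strip line) ≠ 0 := by
      rw [PySem.Str.len_eq, PySem.Str.toList_strip, hrest]
      intro hcon
      have hnil : PySem.Chars.strip ('[' :: rest) = [] :=
        List.length_eq_zero_iff.mp (by exact_mod_cast hcon)
      unfold PySem.Chars.strip PySem.Chars.rstrip PySem.Chars.lstrip at hnil
      have hd : List.dropWhile PySem.Chars.isspace ('[' :: rest) = '[' :: rest := by
        simp [List.dropWhile, show PySem.Chars.isspace '[' = false from rfl]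
      rw [hd] at hnil
      have h2 : List.dropWhile PySem.Chars.isspace ('[' :: rest).reverse = [] := by
        have := congrArg List.reverse hnil; simpa using this
      have h1 := List.dropWhile_eq_nil_iff.mp h2 '[' (by simp)
      simp [show PySem.Chars.isspace '[' = false from rfl] at h1
    have hfind : PySem.Str.find line "] " = PySem.Chars.find.go [']', ' '] line.toList 0 := by
      unfold PySem.Str.find PySem.Chars.find; rfl
    have hclean : pvCleanRem line.toList = (pvScan line.toList).getD line.toList := by
      rw [hrest]; simp [pvCleanRem]
    have hscan : pvScan line.toList = (pvFS line.toList).map Prod.snd := pvScan_eq_pvFS _ hn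
    cases hfs : pvFS line.toList with
    | none =>
      have hni : PySem.Str.isIn "] " line = false := by
        unfold PySem.Str.isIn PySem.Chars.isIn PySem.Chars.find
        rw [show ("] ".toList) = [']', ' '] from rfl, pvFind_go, hfs]
        rfl
      have hAcond : (decide (PySem.Str.len (PySem.Str.strip line) ≠ 0) &&
          PySem.Str.startswith line "[" && PySem.Str.isIn "] " line) = false := by
        rw [hni]; simp
      rw [hAcond, hclean, hscan, hfs]
      simp
    | some pq =>
      obtain ⟨p, q⟩ := pq
      have hdec := pvFS_decomp _ _ _ hfs
      have hi : PySem.Str.isIn "] " line = true := by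
        unfold PySem.Str.isIn PySem.Chars.isIn PySem.Chars.find
        rw [show ("] ".toList) = [']', ' '] from rfl, pvFind_go, hfs]
        simp
      have hp0 : p ≠ [] := by
        intro h; subst h; rw [hrest] at hdec; simp at hdec
      have hfv : PySem.Str.find line "] " = (p.length : Int) := by
        rw [hfind, pvFind_go, hfs]; simp
      have hpos : PySem.Str.find line "] " > 0 := by
        rw [hfv]; exact_mod_cast Nat.pos_of_ne_zero (fun h => hp0 (List.length_eq_zero_iff.mp h))
      have hstrip' : ¬ PySem.Chars.strip line.toList = [] := by
        intro hnil; apply hstrip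
        rw [PySem.Str.len_eq, PySem.Str.toList_strip, hnil]; rfl
      have hAcond : (decide (PySem.Str.len (PySem.Str.strip line) ≠ 0) &&
          PySem.Str.startswith line "[" && PySem.Str.isIn "] " line) = true := by
        rw [hi, hs]; simp [hstrip']
      have hdrop : List.drop (p.length + 2) line.toList = q := by
        rw [hdec, show p ++ [']', ' '] ++ q = (p ++ [']', ' ']) ++ q from by simp,
          show p.length + 2 = (p ++ [']', ' ']).length from by simp, List.drop_left]
      rw [hAcond, hclean, hscan, hfs]
      simp only [if_true, Option.map_some, Option.getD_some, if_pos hpos]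
      rw [hfv]
      rw [show PySem.Str.slice line (some ((p.length : Int) + 2)) none
            = String.ofList (PySem.Chars.slice line.toList (some ((p.length : Int) + 2)) none) from rfl]
      simp only [PySem.Chars.slice_eq_listSlice]
      rw [PySem.List.slice_from _ (by positivity)]
      have h2 : ((p.length : Int) + 2).toNat = p.length + 2 := by omega
      rw [h2, hdrop]
      simp
  · have hb : PySem.Str.startswith line "[" = false := by simpa using hs
    have hAcond : (decide (PySem.Str.len (PySem.Str.strip line) ≠ 0) &&
        PySem.Str.startswith line "[" && PySem.Str.isIn "] " line) = false := by
      rw [hb]; simp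
    rw [hAcond]
    simp only [Bool.false_eq_true, if_false]
    cases hl : line.toList with
    | nil => simp [pvCleanRem]
    | cons c rest =>
      have hc : c ≠ '[' := by
        intro h
        subst h
        unfold PySem.Str.startswith PySem.Chars.startswith at hb
        rw [hl, show ("[".toList) = ['['] from rfl] at hb
        simp [List.isPrefixOf] at hb
      simp [pvCleanRem, hc]

-- ===== VERDICT (by name: the statement is the Claim_ definition above) =====
theorem strip_order_keys_py_spec : Claim_equal_strip_order_keys_py := by
  intro script _
  unfold Spec_strip_order_keys_py strip_order_keys_py strip_order_keys_py_alt
  simp only []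
  rw [pvBody_eq, PySem.List.foldl_append_singleton_eq_map]
  simp only [List.nil_append]
  have hsplit : PySem.Str.split? (PySem.Str.strip script) "\n"
      = some ((pvSplitNl (PySem.Chars.strip script.toList)).map String.ofList) := by
    unfold PySem.Str.split? PySem.Chars.split?
    rw [PySem.Str.toList_strip]
    simp only [show ("\n".toList) = ['\n'] from rfl, List.isEmpty, Bool.false_eq_true, if_false,
      pvSplitOn_eq]
    rfl
  rw [hsplit]
  simp only [Option.getD_some]
  unfold PySem.Str.join
  congr 1
  rw [pvEmit_eq_join (PySem.Chars.strip script.toList).length _ le_rfl]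
  rw [show ("\n".toList) = ['\n'] from rfl]
  congr 1
  rw [List.map_map, List.map_map]
  apply List.map_congr_left
  intro a ha
  have hna : '\n' ∉ a := pvSplitNl_mem_no_nl _ a ha
  have hle := pvLine_eq (String.ofList a) (by simpa using hna)
  simpa using hle
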